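-- pv_equiv track=rewrite | github.com/nayangaripelly/Extractive-Summarisation | src/utils/selection.py | select_indices_with_trigram_blocking
-- ===== SOURCE A (Python) =====
-- import math
--
-- def select_indices_with_trigram_blocking(sentences, scores, k=None):
--     """
--     Returns indices and sentences for the top-k selection with trigram blocking.
--     If k is None, selects ceil(n/4).
--     """
--     num_sentences = len(sentences)
--     if num_sentences == 0:
--         return [], []
--
--     num_to_select = k if k is not None else math.ceil(num_sentences / 4)
--
--     ranked_indices = sorted(range(num_sentences), key=lambda i: scores[i], reverse=True)
--
--     selected_indices = []
--     selected_sentences = []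
--
--     for idx in ranked_indices:
--         if len(selected_indices) >= num_to_select:
--             break
--
--         sentence = sentences[idx]
--         if not trigram_blocking(selected_sentences, sentence):
--             selected_indices.append(idx)
--             selected_sentences.append(sentence)
--
--     return selected_indices, selected_sentences
--
-- def trigram_blocking(summary_sentences, candidate_sentence):
--     """
--     Prevents redundant sentences from being added to the summary.
--     """
--     summary_trigrams = set()
--     for sent in summary_sentences:
--         words = sent.lower().split()
--         for i in range(len(words) - 2):
--             summary_trigrams.add(tuple(words[i:i+3]))
--
--     candidate_words = candidate_sentence.lower().split()
--     for i in range(len(candidate_words) - 2):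
--         if tuple(candidate_words[i:i+3]) in summary_trigrams:
--             return True  # Block this sentence
--
--     return False
-- ===== SOURCE B (Python) =====
-- import math
--
-- def select_indices_with_trigram_blocking(sentences, scores, k=None):
--     n = len(sentences)
--     if n == 0:
--         return [], []
--     num_to_select = k if k is not None else (n + 3) // 4
--     ranked = sorted(range(n), key=lambda i: scores[i], reverse=True)
--     selected_indices = []
--     selected_sentences = []
--     seen = set()  # running trigram set: updated incrementally, never rebuilt
--     for idx in ranked:
--         if len(selected_indices) >= num_to_select:
--             break
--         words = sentences[idx].lower().split()
--         trigrams = list(zip(words, words[1:], words[2:]))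
--         if any(t in seen for t in trigrams):
--             continue
--         seen.update(trigrams)
--         selected_indices.append(idx)
--         selected_sentences.append(sentences[idx])
--     return selected_indices, selected_sentences
-- ===== Notes on version B (the rewrite author's own statement) =====
-- stated objective: faster
-- what changed: B keeps one running trigram set, updated only when a sentence is accepted, instead of rebuilding the whole set of selected-sentence trigrams for every candidate check; trigrams come from a single zip pass per sentence.
import Mathlib
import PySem

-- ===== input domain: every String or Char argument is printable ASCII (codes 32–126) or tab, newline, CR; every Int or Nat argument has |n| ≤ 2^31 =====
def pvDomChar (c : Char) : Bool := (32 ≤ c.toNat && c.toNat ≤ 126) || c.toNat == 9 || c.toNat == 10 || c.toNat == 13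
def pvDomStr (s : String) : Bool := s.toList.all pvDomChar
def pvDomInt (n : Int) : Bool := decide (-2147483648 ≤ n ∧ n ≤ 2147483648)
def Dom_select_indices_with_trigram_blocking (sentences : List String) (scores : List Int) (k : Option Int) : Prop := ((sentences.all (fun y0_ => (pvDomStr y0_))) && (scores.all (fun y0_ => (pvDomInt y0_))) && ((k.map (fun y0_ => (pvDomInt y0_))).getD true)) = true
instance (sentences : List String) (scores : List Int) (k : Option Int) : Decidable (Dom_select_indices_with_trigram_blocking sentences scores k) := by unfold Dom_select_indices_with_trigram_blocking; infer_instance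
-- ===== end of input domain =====

-- B maintains one running trigram set updated as sentences are accepted instead of
-- rebuilding the whole set on every candidate check (objective: faster).

-- ===== PORT A =====

-- words = sent.lower().split()
def pvWordsA (s : String) : List String := PySem.Str.split₀ (PySem.Str.lower s)

-- tuple(words[i:i+3]) for i in range(len(words)-2): indices i, i+1, i+2 are in range,
-- so pyGetD's default "" is never used (exact there).
def pvTriAt (words : List String) (i : Int) : String × String × String :=
  (PySem.List.pyGetD words i "", PySem.List.pyGetD words (i+1) "", PySem.List.pyGetD words (i+2) "")

-- trigram_blocking(summary_sentences, candidate_sentence), literal: rebuild the set, then scan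
def trigram_blocking_port (summary : List String) (cand : String) : Bool :=
  let tset : PySem.Set (String × String × String) :=
    summary.foldl (fun acc sent =>
      let words := pvWordsA sent
      (PySem.List.pyRange 0 ((words.length : Int) - 2) 1).foldl
        (fun acc i => PySem.Set.add acc (pvTriAt words i)) acc)
      PySem.Set.empty
  let cw := pvWordsA cand
  (PySem.List.pyRange 0 ((cw.length : Int) - 2) 1).any
    (fun i => PySem.Set.contains tset (pvTriAt cw i))

-- the for-loop over ranked_indices with its break
def pvALoop (sentences : List String) (num : Int) :
    List Int → List Int × List String → List Int × List String
  | [], acc => acc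
  | idx :: rest, (selI, selS) =>
    if (selI.length : Int) ≥ num then (selI, selS)   -- break
    else
      -- sentences[idx]: idx ∈ range(len(sentences)), in range, default "" never used
      let sentence := PySem.List.pyGetD sentences idx ""
      if trigram_blocking_port selS sentence then
        pvALoop sentences num rest (selI, selS)
      else
        pvALoop sentences num rest (selI ++ [idx], selS ++ [sentence])

def select_indices_with_trigram_blocking (sentences : List String) (scores : List Int) (k : Option Int) : List Int × List String :=
  let num_sentences := sentences.length
  if num_sentences = 0 then ([], [])
  else
    -- math.ceil(n/4) ported as -((-n)//4): exact, since n = len(sentences) < 2^53 so the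
    -- float n/4 rounds to a value with the same ceiling.
    let num_to_select := k.getD (-(PySem.Int.floordiv (-(num_sentences : Int)) 4))
    -- scores[i] for i < len(sentences): Pre_ guarantees in range, default 0 never used
    let ranked := PySem.List.sorted (PySem.List.pyRange 0 (num_sentences : Int) 1)
        (fun i => PySem.List.pyGetD scores i 0) true
    pvALoop sentences num_to_select ranked ([], [])

-- ===== PORT B =====

-- list(zip(words, words[1:], words[2:]))
def pvTrigrams (words : List String) : List (String × String × String) :=
  words.zip ((words.drop 1).zip (words.drop 2))

-- the for-loop: carries the running trigram set `seen`
def pvBLoop (sentences : List String) (num : Int) :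
    List Int → List Int × List String × PySem.Set (String × String × String) →
    List Int × List String
  | [], (selI, selS, _) => (selI, selS)
  | idx :: rest, (selI, selS, seen) =>
    if (selI.length : Int) ≥ num then (selI, selS)   -- break
    else
      let words := PySem.Str.split₀ (PySem.Str.lower (PySem.List.pyGetD sentences idx ""))
      let trigrams := pvTrigrams words
      if trigrams.any (fun t => PySem.Set.contains seen t) then
        pvBLoop sentences num rest (selI, selS, seen)   -- continue
      else
        pvBLoop sentences num rest
          (selI ++ [idx], selS ++ [PySem.List.pyGetD sentences idx ""],
           PySem.Set.update seen trigrams)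

def select_indices_with_trigram_blocking_alt (sentences : List String) (scores : List Int) (k : Option Int) : List Int × List String :=
  let n := sentences.length
  if n = 0 then ([], [])
  else
    let num_to_select := k.getD (PySem.Int.floordiv ((n : Int) + 3) 4)
    let ranked := PySem.List.sorted (PySem.List.pyRange 0 (n : Int) 1)
        (fun i => PySem.List.pyGetD scores i 0) true
    pvBLoop sentences num_to_select ranked ([], [], PySem.Set.empty)

-- ===== PRECONDITION & SPEC =====
-- Pre_ excludes exactly the inputs where A raises: a nonempty sentence list with fewer
-- scores than sentences makes sorted's key raise IndexError.
def Pre_select_indices_with_trigram_blocking (sentences : List String) (scores : List Int) (k : Option Int) : Prop :=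
  sentences.length ≤ scores.length ∨ sentences = []
instance (sentences : List String) (scores : List Int) (k : Option Int) : Decidable (Pre_select_indices_with_trigram_blocking sentences scores k) := by unfold Pre_select_indices_with_trigram_blocking; infer_instance

def pvWitness_select_indices_with_trigram_blocking : List String × List Int × Option Int :=
  (["the cat sat on the mat", "the cat sat down", "a dog ran"], [3, 2, 1], none)

def Spec_select_indices_with_trigram_blocking (sentences : List String) (scores : List Int) (k : Option Int) (out : List Int × List String) : Prop := out = select_indices_with_trigram_blocking_alt sentences scores k
instance (sentences : List String) (scores : List Int) (k : Option Int) (out : List Int × List String) : Decidable (Spec_select_indices_with_trigram_blocking sentences scores k out) := by unfold Spec_select_indices_with_trigram_blocking; infer_instance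

-- ===== CLAIM (what is proved, stated in full; the proofs are below) =====
def Claim_equal_select_indices_with_trigram_blocking : Prop := ∀ (sentences : List String) (scores : List Int) (k : Option Int), Dom_select_indices_with_trigram_blocking sentences scores k → Pre_select_indices_with_trigram_blocking sentences scores k → Spec_select_indices_with_trigram_blocking sentences scores k (select_indices_with_trigram_blocking sentences scores k)

-- ===== LEMMAS AND PROOFS =====

-- the indexed-triple list A ranges over IS B's zip3 trigram list
theorem map_triAt_eq_trigrams (words : List String) :
    (PySem.List.pyRange 0 ((words.length : Int) - 2) 1).map (pvTriAt words) = pvTrigrams words := by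
  apply List.ext_getElem
  · simp [PySem.List.length_pyRange_one, pvTrigrams]
    omega
  · intro j h1 h2
    have hj : j + 2 < words.length := by
      simp [PySem.List.length_pyRange_one] at h1; omega
    have g0 : PySem.List.pyGetD words ((j:Int)) "" = words[j] := by
      rw [PySem.List.pyGetD_natCast]
      simp [List.getD, List.getElem?_eq_getElem (by omega : j < words.length)]
    have g1 : PySem.List.pyGetD words ((j:Int) + 1) "" = words[j+1] := by
      rw [show ((j:Int) + 1) = ((j+1 : Nat) : Int) by push_cast; ring, PySem.List.pyGetD_natCast]
      simp [List.getD, List.getElem?_eq_getElem (by omega : j+1 < words.length)]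
    have g2 : PySem.List.pyGetD words ((j:Int) + 2) "" = words[j+2] := by
      rw [show ((j:Int) + 2) = ((j+2 : Nat) : Int) by push_cast; ring, PySem.List.pyGetD_natCast]
      simp [List.getD, List.getElem?_eq_getElem (by omega : j+2 < words.length)]
    simp [pvTrigrams, pvTriAt, PySem.List.getElem_pyRange_one, g0, g1, g2]
    congr 1
    omega

-- A's per-sentence range fold of Set.add = Set.update with B's trigram list
theorem fold_add_eq_update (words : List String) (acc : PySem.Set (String × String × String)) :
    (PySem.List.pyRange 0 ((words.length : Int) - 2) 1).foldl
      (fun acc i => PySem.Set.add acc (pvTriAt words i)) acc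
    = PySem.Set.update acc (pvTrigrams words) := by
  rw [← map_triAt_eq_trigrams, ← List.foldl_map]
  rfl

-- the set A rebuilds from the selected sentences, as a fold B also computes
def pvSeen (selS : List String) : PySem.Set (String × String × String) :=
  selS.foldl (fun acc sent => PySem.Set.update acc (pvTrigrams (pvWordsA sent))) PySem.Set.empty

theorem trigram_blocking_eq (selS : List String) (cand : String) :
    trigram_blocking_port selS cand
    = (pvTrigrams (pvWordsA cand)).any (fun t => PySem.Set.contains (pvSeen selS) t) := by
  have hf : ∀ (acc : PySem.Set (String × String × String)) (sent : String),
      (PySem.List.pyRange 0 (((pvWordsA sent).length : Int) - 2) 1).foldl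
        (fun acc i => PySem.Set.add acc (pvTriAt (pvWordsA sent) i)) acc
      = PySem.Set.update acc (pvTrigrams (pvWordsA sent)) :=
    fun acc sent => fold_add_eq_update (pvWordsA sent) acc
  unfold trigram_blocking_port
  simp only [hf]
  rw [← map_triAt_eq_trigrams, List.any_map]
  simp only [pvSeen]
  rfl

theorem loop_eq (sentences : List String) (num : Int) (ranked : List Int)
    (selI : List Int) (selS : List String) :
    pvALoop sentences num ranked (selI, selS)
    = pvBLoop sentences num ranked (selI, selS, pvSeen selS) := by
  induction ranked generalizing selI selS with
  | nil => rfl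
  | cons idx rest ih =>
    simp only [pvALoop, pvBLoop]
    by_cases hb : (selI.length : Int) ≥ num
    · simp [hb]
    · simp only [hb, if_false]
      rw [trigram_blocking_eq, ih, ih]
      simp only [pvWordsA]
      have hSeen : pvSeen (selS ++ [PySem.List.pyGetD sentences idx ""])
          = PySem.Set.update (pvSeen selS)
              (pvTrigrams (PySem.Str.split₀ (PySem.Str.lower (PySem.List.pyGetD sentences idx "")))) := by
        simp [pvSeen, List.foldl_append, pvWordsA]
      rw [hSeen]
      rfl

-- ===== VERDICT (by name: the statement is the Claim_ definition above) =====
theorem select_indices_with_trigram_blocking_spec : Claim_equal_select_indices_with_trigram_blocking := by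
  intro sentences scores k _ _
  unfold Spec_select_indices_with_trigram_blocking
  unfold select_indices_with_trigram_blocking select_indices_with_trigram_blocking_alt
  by_cases h : sentences.length = 0
  · simp [h]
  · simp only [h, if_false]
    rw [loop_eq]
    have : -(PySem.Int.floordiv (-(sentences.length : Int)) 4)
         = PySem.Int.floordiv ((sentences.length : Int) + 3) 4 := by
      rw [PySem.Int.floordiv_eq_ediv_of_pos (by norm_num),
          PySem.Int.floordiv_eq_ediv_of_pos (by norm_num)]
      omega
    rw [this]
    rfl
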